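-- pv_equiv track=rewrite | github.com/AblazaAlexander8/ablaza-ifc-v1 | scripts/generate_aifc_pack.py | inject_star
-- ===== SOURCE A (Python) =====
-- from typing import List, Tuple
--
-- def inject_star(lines: List[str], star_day: int) -> List[str]:
--     out = []
--     found = False
--     for i, L in enumerate(lines):
--         if i == 0: out.append(L); continue
--         parts = L.split()
--         new_parts = []
--         for p in parts:
--             try:
--                 val = int(p)
--             except ValueError:
--                 new_parts.append(p); continue
--             if val == star_day and not found:
--                 new_parts.append(f"{val:>2}★"); found = True
--             else:
--                 new_parts.append(f"{val:>3}")
--         out.append(" ".join(new_parts))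
--     return out
-- ===== SOURCE B (Python) =====
-- def inject_star(lines, star_day):
--     # Phase 1: locate the (line, token) position of the first token that int-parses to star_day.
--     pos = None
--     for i in range(1, len(lines)):
--         for j, p in enumerate(lines[i].split()):
--             try:
--                 if int(p) == star_day:
--                     pos = (i, j)
--                     break
--             except ValueError:
--                 continue
--         if pos is not None:
--             break
--
--     def fmt(p, starred):
--         try:
--             v = int(p)
--         except ValueError:
--             return p
--         return f"{v:>2}\u2605" if starred else f"{v:>3}"
--
--     # Phase 2: format every line, starring only the recorded position.
--     return [L if i == 0 else " ".join(fmt(p, pos == (i, j)) for j, p in enumerate(L.split()))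
--             for i, L in enumerate(lines)]
-- ===== Notes on version B (the rewrite author's own statement) =====
-- stated objective: alternative
-- what changed: Replaces A's single interleaved pass carrying a mutable `found` flag with two separate phases: a locating scan that records the (line, token) position of the first token parsing to star_day, then a pure formatting pass that stars exactly that recorded position.
import Mathlib
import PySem

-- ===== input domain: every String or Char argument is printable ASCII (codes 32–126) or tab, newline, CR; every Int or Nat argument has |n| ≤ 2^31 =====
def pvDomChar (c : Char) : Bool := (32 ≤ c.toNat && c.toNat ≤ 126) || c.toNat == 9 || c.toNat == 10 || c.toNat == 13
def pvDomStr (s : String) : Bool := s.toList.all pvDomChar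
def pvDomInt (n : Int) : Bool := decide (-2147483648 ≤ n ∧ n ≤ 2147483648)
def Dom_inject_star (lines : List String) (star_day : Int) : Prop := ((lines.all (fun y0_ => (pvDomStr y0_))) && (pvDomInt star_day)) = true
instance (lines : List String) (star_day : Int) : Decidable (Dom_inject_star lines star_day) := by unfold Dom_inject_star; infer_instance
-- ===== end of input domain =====

-- B replaces A's single pass with an interleaved `found` flag by two phases — first locate the
-- (line, token) position of the first star_day token, then format all lines against that position
-- (objective: alternative decomposition, same cost).

-- ===== PORT A =====
-- f"{v:>3}" = str(v) right-aligned with spaces to width w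
def pyRAlignA (v : Int) (w : Nat) : List Char :=
  let cs := PySem.Int.toChars v
  List.replicate (w - cs.length) ' ' ++ cs

-- the inner `for p in parts` loop, carrying the `found` flag; returns (new_parts, found)
def procPartsA (ps : List String) (star_day : Int) (found : Bool) : List String × Bool :=
  match ps with
  | [] => ([], found)
  | p :: rest =>
    match PySem.Int.ofStr? p with
    | none =>
      let r := procPartsA rest star_day found
      (p :: r.1, r.2)
    | some v =>
      if v = star_day ∧ found = false then
        let r := procPartsA rest star_day true
        (String.mk (pyRAlignA v 2 ++ ['★']) :: r.1, r.2)
      else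
        let r := procPartsA rest star_day found
        (String.mk (pyRAlignA v 3) :: r.1, r.2)

-- the outer loop over lines with index ≥ 1, carrying `found`
def linesA (ls : List String) (star_day : Int) (found : Bool) : List String :=
  match ls with
  | [] => []
  | L :: rest =>
    let r := procPartsA (PySem.Str.split₀ L) star_day found
    PySem.Str.join " " r.1 :: linesA rest star_day r.2

def inject_star (lines : List String) (star_day : Int) : List String :=
  match lines with
  | [] => []
  | L :: rest => L :: linesA rest star_day false

-- ===== PORT B =====
def pyRAlignB (v : Int) (w : Nat) : List Char :=
  let cs := PySem.Int.toChars v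
  List.replicate (w - cs.length) ' ' ++ cs

-- phase 1, inner scan: index (offset j) of the first token of ps that int-parses to star_day
def findTokB (ps : List String) (star_day : Int) (j : Nat) : Option Nat :=
  match ps with
  | [] => none
  | p :: rest =>
    match PySem.Int.ofStr? p with
    | some v => if v = star_day then some j else findTokB rest star_day (j + 1)
    | none => findTokB rest star_day (j + 1)

-- phase 1, outer scan from line index i: first (line, token) position matching star_day
def findPosB (ls : List String) (star_day : Int) (i : Nat) : Option (Nat × Nat) :=
  match ls with
  | [] => none
  | L :: rest =>
    match findTokB (PySem.Str.split₀ L) star_day 0 with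
    | some j => some (i, j)
    | none => findPosB rest star_day (i + 1)

-- fmt(p, starred)
def fmtB (p : String) (starred : Bool) : String :=
  match PySem.Int.ofStr? p with
  | none => p
  | some v => if starred then String.mk (pyRAlignB v 2 ++ ['★']) else String.mk (pyRAlignB v 3)

-- phase 2, per line i: format every token, starring exactly the recorded position
def fmtLineB (ps : List String) (i j : Nat) (pos : Option (Nat × Nat)) : List String :=
  match ps with
  | [] => []
  | p :: rest => fmtB p (pos = some (i, j)) :: fmtLineB rest i (j + 1) pos

-- phase 2, over the lines after line 0
def renderB (ls : List String) (i : Nat) (pos : Option (Nat × Nat)) : List String :=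
  match ls with
  | [] => []
  | L :: rest => PySem.Str.join " " (fmtLineB (PySem.Str.split₀ L) i 0 pos) :: renderB rest (i + 1) pos

def inject_star_alt (lines : List String) (star_day : Int) : List String :=
  match lines with
  | [] => []
  | L :: rest => L :: renderB rest 1 (findPosB rest star_day 1)

-- ===== PRECONDITION & SPEC =====
def Spec_inject_star (lines : List String) (star_day : Int) (out : List String) : Prop := out = inject_star_alt lines star_day
instance (lines : List String) (star_day : Int) (out : List String) : Decidable (Spec_inject_star lines star_day out) := by unfold Spec_inject_star; infer_instance

-- ===== CLAIM (what is proved, stated in full; the proofs are below) =====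
def Claim_equal_inject_star : Prop := ∀ (lines : List String) (star_day : Int), Dom_inject_star lines star_day → Spec_inject_star lines star_day (inject_star lines star_day)

-- ===== LEMMAS AND PROOFS =====

theorem fmtB_none {p : String} (hp : PySem.Int.ofStr? p = none) (b : Bool) :
    fmtB p b = p := by simp [fmtB, hp]

theorem fmtB_some_false {p : String} {v : Int} (hp : PySem.Int.ofStr? p = some v) :
    fmtB p false = String.mk (pyRAlignA v 3) := by
  simp [fmtB, hp, pyRAlignA, pyRAlignB]

theorem fmtB_some_true {p : String} {v : Int} (hp : PySem.Int.ofStr? p = some v) :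
    fmtB p true = String.mk (pyRAlignA v 2 ++ ['★']) := by
  simp [fmtB, hp, pyRAlignA, pyRAlignB]

-- with `found` already true, A formats every token plainly (= fmtB _ false)
theorem procPartsA_true (ps : List String) (sd : Int) :
    procPartsA ps sd true = (ps.map (fun p => fmtB p false), true) := by
  induction ps with
  | nil => rfl
  | cons p rest ih =>
    cases hp : PySem.Int.ofStr? p with
    | none => simp [procPartsA, hp, ih, fmtB_none hp]
    | some v => simp [procPartsA, hp, ih, fmtB_some_false hp]

-- a position that can never point at (i, j') for j' ≥ j makes fmtLineB all-plain
theorem fmtLineB_miss (ps : List String) (i j : Nat) (pos : Option (Nat × Nat))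
    (h : ∀ j', j ≤ j' → pos ≠ some (i, j')) :
    fmtLineB ps i j pos = ps.map (fun p => fmtB p false) := by
  induction ps generalizing j with
  | nil => rfl
  | cons p rest ih =>
    have h0 : pos ≠ some (i, j) := h j le_rfl
    simp [fmtLineB, h0, ih (j + 1) (fun j' hj' => h j' (by omega))]

theorem findTokB_ge (ps : List String) (sd : Int) (j k : Nat)
    (h : findTokB ps sd j = some k) : j ≤ k := by
  induction ps generalizing j with
  | nil => simp [findTokB] at h
  | cons p rest ih =>
    cases hp : PySem.Int.ofStr? p with
    | none =>
      simp only [findTokB, hp] at h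
      exact Nat.le_of_succ_le (ih (j + 1) h)
    | some v =>
      simp only [findTokB, hp] at h
      by_cases hv : v = sd
      · simp [hv] at h; omega
      · simp only [if_neg hv] at h
        exact Nat.le_of_succ_le (ih (j + 1) h)

-- key inner-loop correspondence: A's pass with found=false vs B's locate-then-format on one line
theorem procPartsA_false (ps : List String) (sd : Int) (i j : Nat) :
    procPartsA ps sd false =
      (fmtLineB ps i j ((findTokB ps sd j).map (fun k => (i, k))), (findTokB ps sd j).isSome) := by
  induction ps generalizing j with
  | nil => rfl
  | cons p rest ih =>
    cases hp : PySem.Int.ofStr? p with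
    | none =>
      have hmiss : ((findTokB rest sd (j + 1)).map (fun k => ((i, k) : Nat × Nat))) ≠ some (i, j) := by
        cases hf : findTokB rest sd (j + 1) with
        | none => simp
        | some k => have := findTokB_ge rest sd (j + 1) k hf; simp; omega
      simp [procPartsA, findTokB, fmtLineB, hp, ih (j + 1), fmtB_none hp, hmiss]
    | some v =>
      by_cases hv : v = sd
      · have hcond : v = sd ∧ (false : Bool) = false := ⟨hv, rfl⟩
        have hmiss : ∀ j', j + 1 ≤ j' → (some (i, j) : Option (Nat × Nat)) ≠ some (i, j') := by
          intro j' hj' hcon; simp at hcon; omega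
        simp [procPartsA, findTokB, fmtLineB, hp, hv, procPartsA_true,
              fmtB_some_true hp, fmtLineB_miss rest i (j + 1) _ hmiss]
      · have hcond : ¬ (v = sd ∧ (false : Bool) = false) := fun hc => hv hc.1
        have hmiss : ((findTokB rest sd (j + 1)).map (fun k => ((i, k) : Nat × Nat))) ≠ some (i, j) := by
          cases hf : findTokB rest sd (j + 1) with
          | none => simp
          | some k => have := findTokB_ge rest sd (j + 1) k hf; simp; omega
        simp [procPartsA, findTokB, fmtLineB, hp, if_neg hv,
              ih (j + 1), fmtB_some_false hp, hmiss]

-- once found, all remaining lines are plain: renderB with a position in an earlier line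
theorem linesA_true (ls : List String) (sd : Int) (i : Nat) (pos : Option (Nat × Nat))
    (h : ∀ i' b, i ≤ i' → pos ≠ some (i', b)) :
    linesA ls sd true = renderB ls i pos := by
  induction ls generalizing i with
  | nil => rfl
  | cons L rest ih =>
    have hmiss : ∀ j', 0 ≤ j' → pos ≠ some (i, j') := fun j' _ => h i j' le_rfl
    simp [linesA, renderB, procPartsA_true,
          fmtLineB_miss (PySem.Str.split₀ L) i 0 pos hmiss,
          ih (i + 1) (fun i' b hi' => h i' b (by omega))]

theorem findPosB_ge (ls : List String) (sd : Int) (i a b : Nat)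
    (h : findPosB ls sd i = some (a, b)) : i ≤ a := by
  induction ls generalizing i with
  | nil => simp [findPosB] at h
  | cons L rest ih =>
    cases hf : findTokB (PySem.Str.split₀ L) sd 0 with
    | some j => simp only [findPosB, hf] at h; simp at h; omega
    | none =>
      simp only [findPosB, hf] at h
      exact Nat.le_of_succ_le (ih (i + 1) h)

-- outer correspondence: A's pass with found=false vs B's locate-then-render
theorem linesA_false (ls : List String) (sd : Int) (i : Nat) :
    linesA ls sd false = renderB ls i (findPosB ls sd i) := by
  induction ls generalizing i with
  | nil => rfl
  | cons L rest ih =>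
    cases hf : findTokB (PySem.Str.split₀ L) sd 0 with
    | some j =>
      have htail : linesA rest sd true = renderB rest (i + 1) (some (i, j)) :=
        linesA_true rest sd (i + 1) (some (i, j))
          (by intro i' b hi' hcon; simp at hcon; omega)
      simp [linesA, renderB, findPosB, hf, procPartsA_false (i := i) (j := 0), htail]
    | none =>
      have e1 : fmtLineB (PySem.Str.split₀ L) i 0 (none : Option (Nat × Nat)) =
          (PySem.Str.split₀ L).map (fun p => fmtB p false) :=
        fmtLineB_miss _ i 0 none (by simp)
      have hmiss2 : ∀ j', 0 ≤ j' → findPosB rest sd (i + 1) ≠ some (i, j') := by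
        intro j' _ hcon
        have := findPosB_ge rest sd (i + 1) i j' hcon
        omega
      simp [linesA, renderB, findPosB, hf, procPartsA_false (i := i) (j := 0), e1,
            fmtLineB_miss (PySem.Str.split₀ L) i 0 _ hmiss2, ih (i + 1)]

-- ===== VERDICT (by name: the statement is the Claim_ definition above) =====
theorem inject_star_spec : Claim_equal_inject_star := by
  intro lines sd _
  unfold Spec_inject_star inject_star inject_star_alt
  cases lines with
  | nil => rfl
  | cons L rest => simp [linesA_false rest sd 1]
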